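-- pv_equiv track=rewrite | github.com/Tokyo113/leetcode_python | 中级班/chapter1/code_02_AppleMinBags.py | minBags2
-- ===== SOURCE A (Python) =====
-- def minBags2(n):
--     if n <= 0 or n % 2 != 0:
--         return -1
--     for i in range(n, -1, -1):
--         for j in range(n):
--             if 8*i+6*j == n:
--                 return i+j
--
--     return -1
-- ===== SOURCE B (Python) =====
-- def minBags2(n):
--     # closed form: the minimal number of 6-apple bags is determined by n mod 8
--     if n <= 0 or n % 2 != 0:
--         return -1
--     j = (3 * (n % 8) // 2) % 4      # smallest j >= 0 with 6*j == n (mod 8)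
--     rem = n - 6 * j
--     if rem < 0:
--         return -1
--     return rem // 8 + j
-- ===== Notes on version B (the rewrite author's own statement) =====
-- stated objective: alternative
-- what changed: Replaced the nested search over all (i,j) pairs by a closed form: n mod 8 determines the minimal number of 6-apple bags, the rest are 8-apple bags.
import Mathlib
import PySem

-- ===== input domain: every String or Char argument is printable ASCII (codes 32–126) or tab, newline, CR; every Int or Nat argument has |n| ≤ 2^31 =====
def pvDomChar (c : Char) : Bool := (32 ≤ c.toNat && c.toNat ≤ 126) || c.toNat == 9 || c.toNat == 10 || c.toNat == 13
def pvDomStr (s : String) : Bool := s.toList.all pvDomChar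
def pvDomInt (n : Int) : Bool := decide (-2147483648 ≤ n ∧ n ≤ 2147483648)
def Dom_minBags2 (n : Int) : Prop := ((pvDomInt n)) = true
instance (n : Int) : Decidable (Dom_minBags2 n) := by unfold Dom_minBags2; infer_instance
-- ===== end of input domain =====

-- B replaces A's nested search over all (i, j) pairs by a closed form:
-- n mod 8 determines the minimal number of 6-apple bags, the rest are 8-apple bags.

-- ===== PORT A =====
-- the nested for-loops with early return become findSome? over the same ranges
def minBags2 (n : Int) : Int :=
  if n ≤ 0 ∨ PySem.Int.mod n 2 ≠ 0 then -1
  else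
    match (PySem.List.pyRange n (-1) (-1)).findSome? (fun i =>
        (PySem.List.pyRange 0 n 1).findSome? (fun j =>
          if 8 * i + 6 * j = n then some (i + j) else none)) with
    | some r => r
    | none => -1

-- ===== PORT B =====
-- closed form: j = minimal count of 6-bags, fixed by n mod 8
def minBags2_alt (n : Int) : Int :=
  if n ≤ 0 ∨ PySem.Int.mod n 2 ≠ 0 then -1
  else
    let j := PySem.Int.mod (PySem.Int.floordiv (3 * PySem.Int.mod n 8) 2) 4
    let rem := n - 6 * j
    if rem < 0 then -1 else PySem.Int.floordiv rem 8 + j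

-- ===== PRECONDITION & SPEC =====
def Spec_minBags2 (n : Int) (out : Int) : Prop := out = minBags2_alt n
instance (n : Int) (out : Int) : Decidable (Spec_minBags2 n out) := by unfold Spec_minBags2; infer_instance

-- ===== CLAIM (what is proved, stated in full; the proofs are below) =====
def Claim_equal_minBags2 : Prop := ∀ (n : Int), Dom_minBags2 n → Spec_minBags2 n (minBags2 n)

-- ===== LEMMAS AND PROOFS =====

-- inner loop finds nothing when no j in [0, n) solves 8*i + 6*j = n
theorem inner_none (n i : Int) (h : ∀ j : Int, 0 ≤ j → j < n → 8 * i + 6 * j ≠ n) :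
    (PySem.List.pyRange 0 n 1).findSome? (fun j =>
      if 8 * i + 6 * j = n then some (i + j) else none) = none := by
  rw [List.findSome?_eq_none_iff]
  intro j hj
  rw [PySem.List.mem_pyRange_one] at hj
  rw [if_neg (h j hj.1 hj.2)]

-- inner loop returns some (i + j) at the unique solution j
theorem inner_some (n i j : Int) (he : 8 * i + 6 * j = n) (hj : 0 ≤ j) (hjn : j < n) :
    (PySem.List.pyRange 0 n 1).findSome? (fun j =>
      if 8 * i + 6 * j = n then some (i + j) else none) = some (i + j) := by
  rw [PySem.List.pyRange_one_append 0 j n hj (le_of_lt hjn), List.findSome?_append]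
  have h1 : (PySem.List.pyRange 0 j 1).findSome? (fun j =>
      if 8 * i + 6 * j = n then some (i + j) else none) = none := by
    rw [List.findSome?_eq_none_iff]
    intro j' hj'
    rw [PySem.List.mem_pyRange_one] at hj'
    rw [if_neg (by omega)]
  rw [h1, PySem.List.pyRange_one_cons hjn, List.findSome?_cons, if_pos he]
  rfl

theorem minBags2_eq_alt (n : Int) : minBags2 n = minBags2_alt n := by
  unfold minBags2 minBags2_alt
  by_cases hg : n ≤ 0 ∨ PySem.Int.mod n 2 ≠ 0
  · rw [if_pos hg, if_pos hg]
  · rw [if_neg hg, if_neg hg]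
    push Not at hg
    obtain ⟨hn, hm⟩ := hg
    rw [PySem.Int.mod_eq_emod_of_pos (by norm_num : (0:Int) < 2)] at hm
    have hn' : 0 < n := by omega
    have hj0 : PySem.Int.mod (PySem.Int.floordiv (3 * PySem.Int.mod n 8) 2) 4
        = (3 * (n % 8) / 2) % 4 := by
      rw [PySem.Int.mod_eq_emod_of_pos (by norm_num : (0:Int) < 8),
          PySem.Int.floordiv_eq_ediv_of_pos (by norm_num : (0:Int) < 2),
          PySem.Int.mod_eq_emod_of_pos (by norm_num : (0:Int) < 4)]
    rw [hj0]
    set j0 : Int := (3 * (n % 8) / 2) % 4 with hj0def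
    have hj0b : 0 ≤ j0 ∧ j0 < 4 := by constructor <;> omega
    have hdvd : (n - 6 * j0) % 8 = 0 := by omega
    by_cases hr : n - 6 * j0 < 0
    · rw [if_pos hr]
      have houter : (PySem.List.pyRange n (-1) (-1)).findSome? (fun i =>
          (PySem.List.pyRange 0 n 1).findSome? (fun j =>
            if 8 * i + 6 * j = n then some (i + j) else none)) = none := by
        rw [List.findSome?_eq_none_iff]
        intro i hi
        rw [PySem.List.mem_pyRange_neg_one] at hi
        refine inner_none n i (fun j h1 h2 he => ?_)
        have e1 : (n - 6 * j) % 8 = 0 := by omega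
        have e2 : (j - j0) % 4 = 0 := by omega
        have e3 : j0 ≤ j := by omega
        omega
      rw [houter]
    · rw [if_neg hr]
      push Not at hr
      rw [PySem.Int.floordiv_eq_ediv_of_pos (by norm_num : (0:Int) < 8)]
      set i0 : Int := (n - 6 * j0) / 8 with hi0def
      have hi0 : 8 * i0 = n - 6 * j0 := by omega
      have hi0b : 0 ≤ i0 ∧ i0 ≤ n := by constructor <;> omega
      have houter : (PySem.List.pyRange n (-1) (-1)).findSome? (fun i =>
          (PySem.List.pyRange 0 n 1).findSome? (fun j =>
            if 8 * i + 6 * j = n then some (i + j) else none)) = some (i0 + j0) := by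
        rw [PySem.List.pyRange_neg_one_eq_reverse,
            show (-1 : Int) + 1 = 0 by norm_num,
            PySem.List.pyRange_one_append 0 (i0 + 1) (n + 1) (by omega) (by omega),
            List.reverse_append, List.findSome?_append]
        have h1 : ((PySem.List.pyRange (i0 + 1) (n + 1) 1).reverse).findSome? (fun i =>
            (PySem.List.pyRange 0 n 1).findSome? (fun j =>
              if 8 * i + 6 * j = n then some (i + j) else none)) = none := by
          rw [List.findSome?_eq_none_iff]
          intro i hi
          rw [List.mem_reverse, PySem.List.mem_pyRange_one] at hi
          -- no solution with i > i0: any j solving 8i+6j=n has j ≡ j0 (mod 4), so j ≥ j0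
          refine inner_none n i (fun j h1 h2 he => ?_)
          have e1 : (n - 6 * j) % 8 = 0 := by omega
          have e2 : (j - j0) % 4 = 0 := by omega
          have e3 : j0 ≤ j := by omega
          omega
        rw [h1, PySem.List.pyRange_one_succ_right (show (0:Int) ≤ i0 by omega), List.reverse_append]
        simp only [List.reverse_cons, List.reverse_nil, List.nil_append, List.cons_append,
          List.findSome?_cons]
        rw [inner_some n i0 j0 (by omega) (by omega) (by omega)]
        rfl
      rw [houter]

-- ===== VERDICT (by name: the statement is the Claim_ definition above) =====
theorem minBags2_spec : Claim_equal_minBags2 := by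
  intro n _
  unfold Spec_minBags2
  exact minBags2_eq_alt n
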